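-- pv_equiv track=rewrite | github.com/2025-I/proyecto-1-ada-ii-2025-i-grupo-f | src/fiesta.py | resolver_fiesta_voraz
-- ===== SOURCE A (Python) =====
-- def resolver_fiesta_voraz(matriz, convivencias):
--     n = len(matriz) #cantidad de empleados
--     empleados = list(range(n)) #Crea una lista con los índices de todos los empleados: [0, 1, 2, ..., n-1].
--     # Paso 1: Crear listas para registrar supervisiones
--     supervisa = [set() for _ in range(n)]   #  empleados que son supervisados por i
--     supervisado_por = [set() for _ in range(n)] # quién supervisa a j
--
--     for i in range(n):
--         for j in range(n):
--             if matriz[i][j]==1: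
--                 supervisa[i].add(j) #Se agrega j al conjunto supervisa[i].
--                 supervisado_por[j].add(i) #Se agrega i al conjunto supervisado_por[j].
--
--     # Paso 2: Ordenar empleados por mayor convivencia (descendente)
--     #
--     empleados.sort(key=lambda x: convivencias[x], reverse=True)
--     # Paso 3: Seleccionar invitados evitando conflictos
--     invitados = [0] * n #5 → [0, 0, 0, 0, 0]
--     incompatibles = set() # los que no pueden ser invitados
--
--     for i in empleados:
--         if i in incompatibles:
--             continue
--         if matriz[i][i] == 1:  # se supervisa a sí mismo
--             continue
--         invitados[i] = 1
--
--         # Marcar como incompatibles a quienes él supervisa o lo supervisan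
--         incompatibles.update(supervisa[i])
--         incompatibles.update(supervisado_por[i])
--         incompatibles.add(i)
--      # Paso 4: Calcular la suma de convivencia de los invitados
--     suma = sum(convivencias[i] for i in range(n) if invitados[i])
--
--     return invitados, suma
-- ===== SOURCE B (Python) =====
-- def resolver_fiesta_voraz(matriz, convivencias):
--     n = len(matriz)
--     # Greedy over the same stable descending order, but keep ONLY the accepted
--     # guest list: a candidate is tested directly against the already-accepted
--     # guests ("pull"), instead of maintaining a blocked/incompatible set ("push").
--     elegidos = []
--     for i in sorted(range(n), key=lambda x: convivencias[x], reverse=True):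
--         if matriz[i][i] != 1 and all(
--             matriz[i][j] != 1 and matriz[j][i] != 1 for j in elegidos
--         ):
--             elegidos.append(i)
--     invitados = [1 if i in elegidos else 0 for i in range(n)]
--     suma = sum(convivencias[i] for i in elegidos)
--     return invitados, suma
-- ===== Notes on version B (the rewrite author's own statement) =====
-- stated objective: alternative
-- what changed: A precomputes supervisa/supervisado_por index sets and pushes incompatibilities into a blocked set when inviting; B keeps no blocked structure at all: it maintains only the accepted-guest list and tests each candidate directly against the accepted guests (pull instead of push), then derives invitados and the sum from that list.
import Mathlib
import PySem

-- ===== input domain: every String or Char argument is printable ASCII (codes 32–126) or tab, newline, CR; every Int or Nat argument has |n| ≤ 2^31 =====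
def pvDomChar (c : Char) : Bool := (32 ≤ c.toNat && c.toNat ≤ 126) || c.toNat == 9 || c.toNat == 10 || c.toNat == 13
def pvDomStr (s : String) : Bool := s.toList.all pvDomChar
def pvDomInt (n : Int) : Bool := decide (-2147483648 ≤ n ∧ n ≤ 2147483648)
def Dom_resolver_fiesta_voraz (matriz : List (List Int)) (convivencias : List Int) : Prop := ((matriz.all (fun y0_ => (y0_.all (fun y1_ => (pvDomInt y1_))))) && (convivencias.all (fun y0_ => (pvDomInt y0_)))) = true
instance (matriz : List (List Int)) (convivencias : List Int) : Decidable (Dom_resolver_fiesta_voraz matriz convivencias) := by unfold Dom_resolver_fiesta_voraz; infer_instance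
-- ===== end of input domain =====

-- B keeps no blocked/incompatible structure at all: it maintains only the accepted-guest list and
-- tests each candidate directly against the accepted guests (pull instead of A's push of
-- precomputed supervision sets into a blocked set); objective: alternative, same worst-case cost.

-- ===== PORT A =====
-- A-side helpers: the named loop bodies of A.  All Python indices here are the
-- nonnegative ints 0..n-1, kept as Nat; list indexing xs[i] with in-range i is List.getD
-- (exact under Pre_, which excludes the IndexError inputs).
def pvBuildStep (matriz : List (List Int)) (i : Nat)
    (q : List (PySem.Set Int) × List (PySem.Set Int)) (j : Nat) :
    List (PySem.Set Int) × List (PySem.Set Int) :=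
  if (matriz.getD i []).getD j 0 == 1 then
    (q.1.set i (PySem.Set.add (q.1.getD i []) (j : Int)),
     q.2.set j (PySem.Set.add (q.2.getD j []) (i : Int)))
  else q

-- Paso 1: the double loop building supervisa (first) and supervisado_por (second)
def pvBuild (matriz : List (List Int)) (n : Nat) :
    List (PySem.Set Int) × List (PySem.Set Int) :=
  (List.range n).foldl (fun p i => (List.range n).foldl (pvBuildStep matriz i) p)
    ((List.range n).map (fun _ => (PySem.Set.empty : PySem.Set Int)),
     (List.range n).map (fun _ => (PySem.Set.empty : PySem.Set Int)))

-- Paso 3: one iteration of A's greedy loop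
def pvStepA (matriz : List (List Int)) (sets : List (PySem.Set Int) × List (PySem.Set Int))
    (st : List Int × PySem.Set Int) (i : Nat) : List Int × PySem.Set Int :=
  if st.2.contains (i : Int) then st
  else if (matriz.getD i []).getD i 0 == 1 then st
  else (st.1.set i 1,
        PySem.Set.add
          (PySem.Set.update (PySem.Set.update st.2 (sets.1.getD i [])) (sets.2.getD i []))
          (i : Int))

-- Paso 4: sum(convivencias[i] for i in range(n) if invitados[i])
def pvSumA (convivencias : List Int) (n : Nat) (invitados : List Int) : Int :=
  (List.range n).foldl
    (fun acc k => if invitados.getD k 0 ≠ 0 then acc + convivencias.getD k 0 else acc) 0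

def resolver_fiesta_voraz (matriz : List (List Int)) (convivencias : List Int) : List Int × Int :=
  let n := matriz.length
  let sets := pvBuild matriz n
  -- Paso 2: stable descending sort of the employee indices
  let empleados := PySem.List.sorted (List.range n) (fun x => convivencias.getD x 0) true
  let st := empleados.foldl (pvStepA matriz sets)
      (List.replicate n (0 : Int), (PySem.Set.empty : PySem.Set Int))
  (st.1, pvSumA convivencias n st.1)

-- ===== PORT B =====
-- B-side helper: "all(matriz[i][j] != 1 and matriz[j][i] != 1 for j in elegidos)"
def pvCompatible (matriz : List (List Int)) (i : Nat) (eleg : List Nat) : Bool :=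
  eleg.all (fun j => !((matriz.getD i []).getD j 0 == 1) && !((matriz.getD j []).getD i 0 == 1))

-- one iteration of B's loop: accept i or leave elegidos unchanged
def pvStepB (matriz : List (List Int)) (eleg : List Nat) (i : Nat) : List Nat :=
  if !((matriz.getD i []).getD i 0 == 1) && pvCompatible matriz i eleg then eleg ++ [i] else eleg

def resolver_fiesta_voraz_alt (matriz : List (List Int)) (convivencias : List Int) : List Int × Int :=
  let n := matriz.length
  let elegidos := (PySem.List.sorted (List.range n) (fun x => convivencias.getD x 0) true).foldl
      (pvStepB matriz) []
  ((List.range n).map (fun i => if i ∈ elegidos then (1 : Int) else 0),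
   elegidos.foldl (fun acc i => acc + convivencias.getD i 0) 0)

-- ===== PRECONDITION & SPEC =====
-- Pre_ excludes exactly the IndexError inputs of A: a row of `matriz` shorter than the number
-- of rows, or `convivencias` shorter than the number of rows.
def Pre_resolver_fiesta_voraz (matriz : List (List Int)) (convivencias : List Int) : Prop :=
  (∀ row ∈ matriz, matriz.length ≤ row.length) ∧ matriz.length ≤ convivencias.length
instance (matriz : List (List Int)) (convivencias : List Int) : Decidable (Pre_resolver_fiesta_voraz matriz convivencias) := by unfold Pre_resolver_fiesta_voraz; infer_instance

def pvWitness_resolver_fiesta_voraz : List (List Int) × List Int := ([[0, 1], [0, 0]], [3, 5])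

def Spec_resolver_fiesta_voraz (matriz : List (List Int)) (convivencias : List Int) (out : List Int × Int) : Prop := out = resolver_fiesta_voraz_alt matriz convivencias
instance (matriz : List (List Int)) (convivencias : List Int) (out : List Int × Int) : Decidable (Spec_resolver_fiesta_voraz matriz convivencias out) := by unfold Spec_resolver_fiesta_voraz; infer_instance

-- ===== CLAIM (what is proved, stated in full; the proofs are below) =====
def Claim_equal_resolver_fiesta_voraz : Prop := ∀ (matriz : List (List Int)) (convivencias : List Int), Dom_resolver_fiesta_voraz matriz convivencias → Pre_resolver_fiesta_voraz matriz convivencias → Spec_resolver_fiesta_voraz matriz convivencias (resolver_fiesta_voraz matriz convivencias)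

-- ===== LEMMAS AND PROOFS =====

-- the matrix entry matriz[i][j] as both ports read it
def pvM (matriz : List (List Int)) (i j : Nat) : Int := (matriz.getD i []).getD j 0

-- supervisa[i] restricted to inner indices < m
def pvRow (matriz : List (List Int)) (i m : Nat) : List Int :=
  ((List.range m).filter (fun j => pvM matriz i j == 1)).map (fun j => (j : Int))

-- supervisado_por[j] restricted to outer indices < t
def pvCol (matriz : List (List Int)) (t j : Nat) : List Int :=
  ((List.range t).filter (fun i => pvM matriz i j == 1)).map (fun i => (i : Int))

lemma pvAdd_not_mem {s : PySem.Set Int} {x : Int} (h : x ∉ s) :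
    PySem.Set.add s x = s ++ [x] := by simp [PySem.Set.add, h]

lemma pv_getD_map_range {α : Type} (n t : Nat) (f : Nat → α) (d : α) (ht : t < n) :
    ((List.range n).map f).getD t d = f t := by
  rw [List.getD_eq_getElem?_getD]; simp [ht]

lemma pv_set_map_range {α : Type} (n t : Nat) (f : Nat → α) (v : α) :
    ((List.range n).map f).set t v = (List.range n).map (fun i => if i = t then v else f i) := by
  apply List.ext_getElem <;> simp
  intro i hi
  rw [List.getElem_set]
  by_cases h : i = t <;> simp [h]
  omega

lemma pvRow_succ (matriz : List (List Int)) (i m : Nat) :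
    pvRow matriz i (m+1)
      = pvRow matriz i m ++ (if pvM matriz i m == 1 then [(m:Int)] else []) := by
  simp only [pvRow, List.range_succ, List.filter_append]
  by_cases h : pvM matriz i m = 1 <;> simp [h]

lemma pvCol_succ (matriz : List (List Int)) (t j : Nat) :
    pvCol matriz (t+1) j
      = pvCol matriz t j ++ (if pvM matriz t j == 1 then [(t:Int)] else []) := by
  simp only [pvCol, List.range_succ, List.filter_append]
  by_cases h : pvM matriz t j = 1 <;> simp [h]

lemma pv_not_mem_Row (matriz : List (List Int)) (i m : Nat) : ((m:Int)) ∉ pvRow matriz i m := by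
  simp [pvRow, List.mem_filter]

lemma pv_not_mem_Col (matriz : List (List Int)) (t j : Nat) : ((t:Int)) ∉ pvCol matriz t j := by
  simp [pvCol, List.mem_filter]

lemma pvInner (matriz : List (List Int)) (n t : Nat) (ht : t < n) :
    ∀ m, m ≤ n →
    (List.range m).foldl (pvBuildStep matriz t)
      ((List.range n).map (fun i => if i < t then pvRow matriz i n else []),
       (List.range n).map (fun j => pvCol matriz t j))
    = ((List.range n).map (fun i => if i < t then pvRow matriz i n
                                    else if i = t then pvRow matriz t m else []),
       (List.range n).map (fun j => if j < m then pvCol matriz (t+1) j else pvCol matriz t j)) := by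
  intro m
  induction m with
  | zero =>
    intro _
    simp only [List.range_zero, List.foldl_nil, Prod.mk.injEq]
    constructor <;> · apply List.map_congr_left; intro i hi; split_ifs <;> simp_all [pvRow]
  | succ m ih =>
    intro hm
    have hmn : m < n := by omega
    rw [List.range_succ, List.foldl_append, List.foldl_cons, List.foldl_nil, ih (by omega)]
    show pvBuildStep matriz t _ m = _
    rw [pvBuildStep]
    by_cases hc : pvM matriz t m = 1
    · have hc' : ((matriz.getD t []).getD m 0 == 1) = true := by simpa [pvM] using hc
      rw [if_pos hc']
      have h1 : ((List.range n).map (fun i => if i < t then pvRow matriz i n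
                  else if i = t then pvRow matriz t m else [])).getD t [] = pvRow matriz t m := by
        rw [pv_getD_map_range _ _ _ _ ht]; simp
      have h2 : ((List.range n).map (fun j => if j < m then pvCol matriz (t+1) j else pvCol matriz t j)).getD m [] = pvCol matriz t m := by
        rw [pv_getD_map_range _ _ _ _ hmn]; simp
      simp only [h1, h2]
      rw [pvAdd_not_mem (pv_not_mem_Row matriz t m), pvAdd_not_mem (pv_not_mem_Col matriz t m)]
      rw [pv_set_map_range, pv_set_map_range]
      simp only [Prod.mk.injEq]
      constructor
      · apply List.map_congr_left; intro i hi
        by_cases h : i = t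
        · subst h; simp [pvRow_succ, hc]
        · simp [h]
      · apply List.map_congr_left; intro j hj
        by_cases h : j = m
        · subst h; simp [pvCol_succ, hc]
        · by_cases h2 : j < m <;> simp [h, h2] <;> omega
    · have hc' : ¬ ((matriz.getD t []).getD m 0 == 1) = true := by simpa [pvM] using hc
      rw [if_neg hc']
      simp only [Prod.mk.injEq]
      constructor
      · apply List.map_congr_left; intro i hi
        by_cases h : i = t
        · subst h; simp [pvRow_succ, hc]
        · simp [h]
      · apply List.map_congr_left; intro j hj
        by_cases h : j = m
        · subst h; simp [pvCol_succ, hc]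
        · by_cases h2 : j < m <;> simp [h2] <;> omega

lemma pvOuter (matriz : List (List Int)) (n : Nat) :
    ∀ t, t ≤ n →
    (List.range t).foldl (fun p i => (List.range n).foldl (pvBuildStep matriz i) p)
      ((List.range n).map (fun _ => (PySem.Set.empty : PySem.Set Int)),
       (List.range n).map (fun _ => (PySem.Set.empty : PySem.Set Int)))
    = ((List.range n).map (fun i => if i < t then pvRow matriz i n else []),
       (List.range n).map (fun j => pvCol matriz t j)) := by
  intro t
  induction t with
  | zero =>
    intro _
    simp only [List.range_zero, List.foldl_nil, Prod.mk.injEq]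
    constructor <;> · apply List.map_congr_left; intro i hi; simp [pvCol, PySem.Set.empty]
  | succ t ih =>
    intro ht
    have htn : t < n := by omega
    rw [List.range_succ, List.foldl_append, List.foldl_cons, List.foldl_nil, ih (by omega)]
    rw [pvInner matriz n t htn n (le_refl n)]
    simp only [Prod.mk.injEq]
    constructor
    · apply List.map_congr_left; intro i hi
      by_cases h : i = t
      · subst h; simp
      · by_cases h2 : i < t <;> simp [h, h2] <;> omega
    · apply List.map_congr_left; intro j hj
      simp [List.mem_range.mp hj]

lemma pvBuild_spec (matriz : List (List Int)) (n : Nat) :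
    pvBuild matriz n
      = ((List.range n).map (fun i => pvRow matriz i n),
         (List.range n).map (fun j => pvCol matriz n j)) := by
  rw [pvBuild, pvOuter matriz n n (le_refl n)]
  simp only [Prod.mk.injEq]
  refine ⟨?_, trivial⟩
  apply List.map_congr_left; intro i hi; simp [List.mem_range.mp hi]

lemma pv_mem_Row {matriz : List (List Int)} {i m : Nat} {k : Nat} :
    ((k : Int) ∈ pvRow matriz i m) ↔ (k < m ∧ pvM matriz i k = 1) := by
  simp [pvRow, List.mem_filter, List.mem_range]

lemma pv_mem_Col {matriz : List (List Int)} {t j : Nat} {k : Nat} :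
    ((k : Int) ∈ pvCol matriz t j) ↔ (k < t ∧ pvM matriz k j = 1) := by
  simp [pvCol, List.mem_filter, List.mem_range]

lemma pvSumA_eq_sum (convivencias : List Int) (n : Nat) (inv : List Int) :
    pvSumA convivencias n inv
      = ((List.range n).map (fun k => if inv.getD k 0 ≠ 0 then convivencias.getD k 0 else 0)).sum := by
  rw [pvSumA]
  have : (fun (acc : Int) (k : Nat) => if inv.getD k 0 ≠ 0 then acc + convivencias.getD k 0 else acc)
       = (fun acc k => acc + (if inv.getD k 0 ≠ 0 then convivencias.getD k 0 else 0)) := by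
    funext acc k; split_ifs <;> simp
  rw [this, PySem.List.foldl_add]
  simp

-- sum of an indicator over a list equals the sum over the selected sublist
lemma pv_sum_indicator (f : Nat → Int) (eleg : List Nat) :
    ∀ (L : List Nat),
    (L.map (fun k => if k ∈ eleg then f k else 0)).sum = ((L.filter (fun k => k ∈ eleg)).map f).sum := by
  intro L
  induction L with
  | nil => simp
  | cons x L ih => by_cases h : x ∈ eleg <;> simp [h, ih]

-- the relation maintained between A's fold state and B's accepted list
def pvRel (matriz : List (List Int)) (n : Nat)
    (sA : List Int × PySem.Set Int) (eleg : List Nat) : Prop :=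
  sA.1 = (List.range n).map (fun k => if k ∈ eleg then (1 : Int) else 0) ∧
  (∀ x ∈ eleg, x < n) ∧ eleg.Nodup ∧
  (∀ k, k < n → (((k : Int) ∈ sA.2) ↔ ∃ j ∈ eleg, j = k ∨ pvM matriz j k = 1 ∨ pvM matriz k j = 1))

lemma pvStep_rel (matriz : List (List Int)) (n : Nat) (i : Nat) (hi : i < n)
    (sA : List Int × PySem.Set Int) (eleg : List Nat) (hnot : i ∉ eleg)
    (h : pvRel matriz n sA eleg) :
    pvRel matriz n (pvStepA matriz (pvBuild matriz n) sA i) (pvStepB matriz eleg i) := by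
  obtain ⟨h1, h2, h3, h4⟩ := h
  have hconf : (∃ j ∈ eleg, pvM matriz j i = 1 ∨ pvM matriz i j = 1) ↔ sA.2.contains (i : Int) = true := by
    rw [PySem.Set.contains_iff, h4 i hi]
    constructor
    · rintro ⟨j, hj, hv⟩
      exact ⟨j, hj, Or.inr hv⟩
    · rintro ⟨j, hj, hv | hv | hv⟩
      · exact absurd (hv ▸ hj) hnot
      · exact ⟨j, hj, Or.inl hv⟩
      · exact ⟨j, hj, Or.inr hv⟩
  have hcompat : pvCompatible matriz i eleg = true ↔ ¬ ∃ j ∈ eleg, pvM matriz j i = 1 ∨ pvM matriz i j = 1 := by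
    rw [pvCompatible, List.all_eq_true]
    constructor
    · rintro hc ⟨j, hj, hv | hv⟩
      · have := hc j hj
        simp only [Bool.and_eq_true, Bool.not_eq_true', beq_eq_false_iff_ne] at this
        exact this.2 hv
      · have := hc j hj
        simp only [Bool.and_eq_true, Bool.not_eq_true', beq_eq_false_iff_ne] at this
        exact this.1 hv
    · intro hc j hj
      simp only [Bool.and_eq_true, Bool.not_eq_true', beq_eq_false_iff_ne]
      exact ⟨fun hv => hc ⟨j, hj, Or.inr hv⟩, fun hv => hc ⟨j, hj, Or.inl hv⟩⟩
  rw [pvStepA, pvStepB]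
  by_cases hc : ∃ j ∈ eleg, pvM matriz j i = 1 ∨ pvM matriz i j = 1
  · have hcf : pvCompatible matriz i eleg = false :=
      Bool.eq_false_iff.mpr (fun hcc => (hcompat.mp hcc) hc)
    rw [if_pos (hconf.mp hc), if_neg (by rw [hcf, Bool.and_false]; exact Bool.false_ne_true)]
    exact ⟨h1, h2, h3, h4⟩
  · have hnc : ¬ sA.2.contains (i : Int) = true := fun hx => hc (hconf.mpr hx)
    rw [if_neg hnc]
    by_cases hs : ((matriz.getD i []).getD i 0 == 1) = true
    · rw [if_pos hs, if_neg (by rw [hs, Bool.not_true, Bool.false_and]; exact Bool.false_ne_true)]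
      exact ⟨h1, h2, h3, h4⟩
    · rw [if_neg hs,
        if_pos (by rw [Bool.eq_false_iff.mpr hs, hcompat.mpr hc, Bool.not_false, Bool.true_and])]
      refine ⟨?_, ?_, ?_, ?_⟩
      · rw [h1, pv_set_map_range]
        apply List.map_congr_left
        intro k hk
        by_cases hki : k = i
        · subst hki; simp
        · simp [hki]
      · intro x hx
        rcases List.mem_append.mp hx with hx | hx
        · exact h2 x hx
        · simp at hx; omega
      · rw [← List.concat_eq_append]
        exact List.Nodup.concat hnot h3
      · intro k hk
        have hR : (pvBuild matriz n).1.getD i [] = pvRow matriz i n := by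
          rw [pvBuild_spec]; exact pv_getD_map_range n i _ [] hi
        have hC : (pvBuild matriz n).2.getD i [] = pvCol matriz n i := by
          rw [pvBuild_spec]; exact pv_getD_map_range n i _ [] hi
        rw [hR, hC, PySem.Set.mem_add, PySem.Set.mem_update, PySem.Set.mem_update,
          h4 k hk, pv_mem_Row, pv_mem_Col]
        constructor
        · rintro (((hx | hx) | hx) | hx)
          · obtain ⟨j, hj, hv⟩ := hx
            exact ⟨j, List.mem_append.mpr (Or.inl hj), hv⟩
          · exact ⟨i, List.mem_append.mpr (Or.inr (by simp)), Or.inr (Or.inl hx.2)⟩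
          · exact ⟨i, List.mem_append.mpr (Or.inr (by simp)), Or.inr (Or.inr hx.2)⟩
          · have hki : k = i := by exact_mod_cast hx
            exact ⟨i, List.mem_append.mpr (Or.inr (by simp)), Or.inl hki.symm⟩
        · rintro ⟨j, hj, hv⟩
          rcases List.mem_append.mp hj with hj | hj
          · exact Or.inl (Or.inl (Or.inl ⟨j, hj, hv⟩))
          · simp only [List.mem_singleton] at hj
            subst hj
            rcases hv with hv | hv | hv
            · exact Or.inr (by exact_mod_cast hv.symm)
            · exact Or.inl (Or.inl (Or.inr ⟨hk, hv⟩))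
            · exact Or.inl (Or.inr ⟨hk, hv⟩)

lemma pvGreedy (matriz : List (List Int)) (n : Nat) :
    ∀ (l : List Nat), (∀ x ∈ l, x < n) → l.Nodup →
    ∀ (sA : List Int × PySem.Set Int) (eleg : List Nat), (∀ x ∈ l, x ∉ eleg) →
    pvRel matriz n sA eleg →
    pvRel matriz n (l.foldl (pvStepA matriz (pvBuild matriz n)) sA)
      (l.foldl (pvStepB matriz) eleg) := by
  intro l
  induction l with
  | nil => intro _ _ sA eleg _ h; exact h
  | cons i l ih =>
    intro hl hnd sA eleg hdisj h
    rw [List.foldl_cons, List.foldl_cons]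
    have hstep := pvStep_rel matriz n i (hl i (by simp)) sA eleg (hdisj i (by simp)) h
    apply ih (fun x hx => hl x (List.mem_cons_of_mem _ hx)) (List.Nodup.of_cons hnd)
    · intro x hx
      rw [pvStepB]
      split_ifs with hcase
      · intro hmem
        rcases List.mem_append.mp hmem with hm | hm
        · exact hdisj x (List.mem_cons_of_mem _ hx) hm
        · simp at hm
          subst hm
          exact (List.nodup_cons.mp hnd).1 hx
      · exact hdisj x (List.mem_cons_of_mem _ hx)
    · exact hstep

-- ===== VERDICT (by name: the statement is the Claim_ definition above) =====
theorem resolver_fiesta_voraz_spec : Claim_equal_resolver_fiesta_voraz := by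
  intro matriz convivencias _ _
  unfold Spec_resolver_fiesta_voraz
  rw [resolver_fiesta_voraz, resolver_fiesta_voraz_alt]
  set n := matriz.length with hn
  set orden := PySem.List.sorted (List.range n) (fun x => convivencias.getD x 0) true with horden
  have hperm : orden.Perm (List.range n) := PySem.List.sorted_perm _ _ _
  have hrel : pvRel matriz n
      (orden.foldl (pvStepA matriz (pvBuild matriz n)) (List.replicate n (0 : Int), (PySem.Set.empty : PySem.Set Int)))
      (orden.foldl (pvStepB matriz) []) := by
    apply pvGreedy
    · intro x hx; exact List.mem_range.mp (hperm.mem_iff.mp hx)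
    · exact hperm.nodup_iff.mpr (List.nodup_range)
    · intro x _ hx; exact absurd hx (List.not_mem_nil)
    · refine ⟨?_, fun x hx => absurd hx (List.not_mem_nil), List.nodup_nil, ?_⟩
      · apply List.ext_getElem <;> simp
      · intro k hk
        constructor
        · intro hx; exact absurd hx (by simp [PySem.Set.empty])
        · rintro ⟨j, hj, _⟩; exact absurd hj (List.not_mem_nil)
  obtain ⟨h1, h2, h3, h4⟩ := hrel
  set eleg := orden.foldl (pvStepB matriz) [] with heleg
  rw [Prod.mk.injEq]
  refine ⟨h1, ?_⟩
  -- the two sums agree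
  rw [h1, pvSumA_eq_sum]
  have hmapcong : (List.range n).map (fun k => if ((List.range n).map (fun k => if k ∈ eleg then (1:Int) else 0)).getD k 0 ≠ 0 then convivencias.getD k 0 else 0)
      = (List.range n).map (fun k => if k ∈ eleg then convivencias.getD k 0 else 0) := by
    apply List.map_congr_left
    intro k hk
    rw [pv_getD_map_range _ _ _ _ (List.mem_range.mp hk)]
    by_cases h : k ∈ eleg <;> simp [h]
  rw [hmapcong, pv_sum_indicator]
  have hfperm : ((List.range n).filter (fun k => k ∈ eleg)).Perm eleg := by
    apply List.perm_of_nodup_nodup_toFinset_eq (List.Nodup.filter _ List.nodup_range) h3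
    apply Finset.ext
    intro a
    simp
    intro ha
    exact h2 a ha
  rw [List.Perm.sum_eq (hfperm.map _)]
  have : (fun (acc : Int) (i : Nat) => acc + convivencias.getD i 0)
       = (fun acc i => acc + (fun i => convivencias.getD i 0) i) := rfl
  rw [this, PySem.List.foldl_add]
  simp
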